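-- pv_equiv track=rewrite | github.com/hyobin96/PCCP_Study | #5. 모의고사 1회/장효빈/problem4_운영체제.py | solution
-- ===== SOURCE A (Python) =====
-- import heapq
--
-- def solution(program):
--     pq1, pq2 = [], []
--
--     for a, b, c in program:
--         heapq.heappush(pq1, (b, a, c))
--
--
--     curr_time = 0
--     answer = [0] * 11
--
--     while pq1 or pq2:
--         while pq1 and pq1[0][0] <= curr_time:
--             b, a, c = heapq.heappop(pq1)
--             heapq.heappush(pq2, (a, b, c))
--
--         if not pq2:
--             b, a, c = heapq.heappop(pq1)
--             heapq.heappush(pq2, (a, b, c))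
--
--         a, b, c = heapq.heappop(pq2)
--
--         if curr_time < b:
--             curr_time = b
--
--         answer[a] += curr_time - b
--
--         curr_time += c
--
--
--     answer[0] = curr_time
--     return answer
-- ===== SOURCE B (Python) =====
-- def solution(program):
--     pending = [(b, a, c) for a, b, c in program]
--     ready = []
--     curr_time = 0
--     answer = [0] * 11
--     while pending or ready:
--         ready += [(a, b, c) for b, a, c in pending if b <= curr_time]
--         pending = [j for j in pending if j[0] > curr_time]
--         if ready:
--             a, b, c = min(ready)
--             ready.remove((a, b, c))
--         else:
--             b, a, c = min(pending)
--             pending.remove((b, a, c))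
--         if curr_time < b:
--             curr_time = b
--         answer[a] += curr_time - b
--         curr_time += c
--     answer[0] = curr_time
--     return answer
-- ===== Notes on version B (the rewrite author's own statement) =====
-- stated objective: simpler
-- what changed: B drops both heaps: pending jobs stay in a plain unsorted list, arrived jobs are moved by list comprehensions, and each step selects the next job with Python's min() (linear selection scan) instead of maintaining heap order.
import Mathlib
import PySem

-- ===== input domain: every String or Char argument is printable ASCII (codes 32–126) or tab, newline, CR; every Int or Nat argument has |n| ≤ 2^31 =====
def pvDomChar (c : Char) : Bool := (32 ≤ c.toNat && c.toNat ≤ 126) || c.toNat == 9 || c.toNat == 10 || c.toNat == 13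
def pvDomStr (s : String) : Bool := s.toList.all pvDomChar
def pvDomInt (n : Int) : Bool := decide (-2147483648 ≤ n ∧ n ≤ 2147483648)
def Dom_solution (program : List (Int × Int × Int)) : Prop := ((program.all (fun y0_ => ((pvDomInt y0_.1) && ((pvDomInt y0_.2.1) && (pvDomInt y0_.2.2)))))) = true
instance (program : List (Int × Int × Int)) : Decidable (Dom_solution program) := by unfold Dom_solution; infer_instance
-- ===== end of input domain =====

-- B removes both heaps: it keeps the not-yet-arrived jobs as a plain list, moves arrived jobs
-- with list comprehensions and selects the next job by Python's min() each step (selection by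
-- linear scan instead of heap order; objective: simpler). Equivalence of RETURN values on Pre_.

-- shared small helpers
-- lt3 = Python's '<' on int triples (lexicographic)
def lt3 (x y : Int × Int × Int) : Bool :=
  x.1 < y.1 || (x.1 == y.1 && (x.2.1 < y.2.1 || (x.2.1 == y.2.1 && x.2.2 < y.2.2)))

-- answer[a] += d on the fixed 11-slot list; exact Python index semantics for -11 ≤ a ≤ 10
-- (out-of-range indices raise IndexError in Python and are excluded by Pre_solution)
def bump (ans : List Int) (a d : Int) : List Int :=
  let i : Int := if a < 0 then a + ans.length else a
  if 0 ≤ i ∧ i < ans.length then ans.set i.toNat (ans.getD i.toNat 0 + d) else ans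

-- ===== PORT A =====
-- heapq.heappush modelled as ordered insertion (value-exact: heappop returns the minimum, and
-- triples comparing equal are identical values, so the popped SEQUENCE is that of a sorted list)
def pvIns (x : Int × Int × Int) (l : List (Int × Int × Int)) : List (Int × Int × Int) :=
  PySem.List.insertBy lt3 x l

-- inner while: pop arrivals with b ≤ curr_time from pq1 (sorted-list heap model: head = min)
def moveA : List (Int × Int × Int) → List (Int × Int × Int) → Int → List (Int × Int × Int) × List (Int × Int × Int)
  | [], pq2, _ => ([], pq2)
  | (b, a, c) :: t, pq2, curr =>
      if b ≤ curr then moveA t (pvIns (a, b, c) pq2) curr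
      else ((b, a, c) :: t, pq2)

-- outer while; fuel = pq1.length + pq2.length (each iteration consumes exactly one job)
def loopA : Nat → List (Int × Int × Int) → List (Int × Int × Int) → Int → List Int → Int × List Int
  | 0, _, _, curr, ans => (curr, ans)
  | fuel + 1, pq1, pq2, curr, ans =>
      if pq1 = [] ∧ pq2 = [] then (curr, ans)
      else
        let m := moveA pq1 pq2 curr
        let s := if m.2 = [] then
            (match m.1 with
             | x :: t => (t, pvIns (x.2.1, x.1, x.2.2) m.2)
             | [] => ([], m.2))
          else m
        match s.2 with
        | (a, b, c) :: t =>
            let curr' := if curr < b then b else curr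
            loopA fuel s.1 t (curr' + c) (bump ans a (curr' - b))
        | [] => (curr, ans)

def solution (program : List (Int × Int × Int)) : List Int :=
  let pq1 := program.foldl (fun l x => pvIns (x.2.1, x.1, x.2.2) l) []
  let r := loopA pq1.length pq1 [] 0 (List.replicate 11 0)
  r.2.set 0 r.1

-- ===== PORT B =====
-- Python's min() on int triples, compared lexicographically (first minimal element); ported by
-- hand (exact: min keeps the earlier element on ties) because PySem.List.min? with a tuple key
-- would compare pairs pointwise, not lexicographically
def min3? : List (Int × Int × Int) → Option (Int × Int × Int)
  | [] => none
  | x :: t => some (t.foldl (fun m y => if lt3 y m then y else m) x)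

-- one iteration of Source B's while loop, then the recursive call; fuel = number of jobs left
def loopB : Nat → List (Int × Int × Int) → List (Int × Int × Int) → Int → List Int → Int × List Int
  | 0, _, _, curr, ans => (curr, ans)
  | fuel + 1, pending, ready, curr, ans =>
      if pending = [] ∧ ready = [] then (curr, ans)
      else
        let ready1 := ready ++ (pending.filter (fun j => j.1 ≤ curr)).map (fun j => (j.2.1, j.1, j.2.2))
        let pending1 := pending.filter (fun j => curr < j.1)
        match min3? ready1 with
        | some (a, b, c) =>
            match PySem.List.remove? ready1 (a, b, c) with
            | some ready2 =>
                let curr' := if curr < b then b else curr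
                loopB fuel pending1 ready2 (curr' + c) (bump ans a (curr' - b))
            | none => (curr, ans)   -- unreachable (min3? returns a member); totality guard only
        | none =>
            match min3? pending1 with
            | some (b, a, c) =>
                match PySem.List.remove? pending1 (b, a, c) with
                | some pending2 =>
                    let curr' := if curr < b then b else curr
                    loopB fuel pending2 ready1 (curr' + c) (bump ans a (curr' - b))
                | none => (curr, ans)   -- unreachable; totality guard only
            | none => (curr, ans)       -- both lists empty (unreachable under the outer guard)

def solution_alt (program : List (Int × Int × Int)) : List Int :=
  let pending0 := program.map (fun x => (x.2.1, x.1, x.2.2))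
  let r := loopB pending0.length pending0 [] 0 (List.replicate 11 0)
  r.2.set 0 r.1

-- ===== PRECONDITION & SPEC =====
-- Pre_ excludes exactly the inputs where A raises IndexError: a priority ≥ 11 or ≤ -12 makes
-- answer[a] an out-of-range index (B raises there too).
def Pre_solution (program : List (Int × Int × Int)) : Prop :=
  ∀ x ∈ program, -11 ≤ x.1 ∧ x.1 ≤ 10
instance (program : List (Int × Int × Int)) : Decidable (Pre_solution program) := by
  unfold Pre_solution; infer_instance

def pvWitness_solution : (List (Int × Int × Int)) := [(1, 0, 2), (2, 0, 1), (3, 5, 2)]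

def Spec_solution (program : List (Int × Int × Int)) (out : List Int) : Prop := out = solution_alt program
instance (program : List (Int × Int × Int)) (out : List Int) : Decidable (Spec_solution program out) := by unfold Spec_solution; infer_instance

-- ===== CLAIM (what is proved, stated in full; the proofs are below) =====
def Claim_equal_solution : Prop := ∀ (program : List (Int × Int × Int)), Dom_solution program → Pre_solution program → Spec_solution program (solution program)

-- ===== LEMMAS AND PROOFS =====

-- 'x ≤ y' for the lexicographic order lt3, as the Bool equation the proofs carry around
def R3 (x y : Int × Int × Int) : Prop := lt3 y x = false

theorem lt3_irrefl (x : Int × Int × Int) : lt3 x x = false := by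
  simp [lt3]

theorem lt3_asymm {x y : Int × Int × Int} (h : lt3 x y = true) : lt3 y x = false := by
  rcases x with ⟨x1, x2, x3⟩; rcases y with ⟨y1, y2, y3⟩
  simp [lt3] at h ⊢; omega

theorem lt3_antisymm {x y : Int × Int × Int} (h1 : lt3 x y = false) (h2 : lt3 y x = false) : x = y := by
  rcases x with ⟨x1, x2, x3⟩; rcases y with ⟨y1, y2, y3⟩
  simp [lt3] at h1 h2; simp; omega

theorem notLt_trans {x y z : Int × Int × Int} (h1 : lt3 y x = false) (h2 : lt3 z y = false) :
    lt3 z x = false := by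
  rcases x with ⟨x1, x2, x3⟩; rcases y with ⟨y1, y2, y3⟩; rcases z with ⟨z1, z2, z3⟩
  simp [lt3] at h1 h2 ⊢; omega

theorem lt3_false_fst_le {x y : Int × Int × Int} (h : lt3 y x = false) : x.1 ≤ y.1 := by
  rcases x with ⟨x1, x2, x3⟩; rcases y with ⟨y1, y2, y3⟩
  simp [lt3] at h; omega

theorem ins_perm (x : Int × Int × Int) (l : List (Int × Int × Int)) :
    (pvIns x l).Perm (x :: l) := by
  induction l with
  | nil => simp [pvIns, PySem.List.insertBy]
  | cons y t ih =>
      simp only [pvIns, PySem.List.insertBy] at ih ⊢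
      by_cases h : lt3 x y = true
      · simp [h]
      · simp only [eq_false_of_ne_true h]
        exact ((ih.cons y).trans (List.Perm.swap x y t))

theorem ins_sorted {x : Int × Int × Int} {l : List (Int × Int × Int)}
    (hs : l.Pairwise R3) : (pvIns x l).Pairwise R3 := by
  induction l with
  | nil => simp [pvIns, PySem.List.insertBy]
  | cons y t ih =>
      rcases List.pairwise_cons.mp hs with ⟨hy, ht⟩
      simp only [pvIns, PySem.List.insertBy]
      by_cases h : lt3 x y = true
      · simp only [h, if_true]
        refine List.pairwise_cons.mpr ⟨?_, hs⟩
        intro z hz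
        rcases hz with _ | hz
        · exact lt3_asymm h
        · exact notLt_trans (lt3_asymm h) (hy z (by assumption))
      · simp only [eq_false_of_ne_true h]
        refine List.pairwise_cons.mpr ⟨?_, ih ht⟩
        intro z hz
        rcases (PySem.List.mem_insertBy lt3 x z t).mp hz with rfl | hz
        · exact eq_false_of_ne_true h
        · exact hy z hz

theorem fold_min_spec (t : List (Int × Int × Int)) : ∀ x : Int × Int × Int,
    (t.foldl (fun m y => if lt3 y m then y else m) x = x ∨
       t.foldl (fun m y => if lt3 y m then y else m) x ∈ t) ∧
    lt3 x (t.foldl (fun m y => if lt3 y m then y else m) x) = false ∧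
    ∀ y ∈ t, lt3 y (t.foldl (fun m y => if lt3 y m then y else m) x) = false := by
  induction t with
  | nil => intro x; exact ⟨Or.inl rfl, lt3_irrefl x, by simp⟩
  | cons y t ih =>
      intro x
      simp only [List.foldl_cons]
      set x' := if lt3 y x then y else x with hx'
      obtain ⟨hmem, hle, hall⟩ := ih x'
      have hx'x : lt3 x x' = false := by
        by_cases h : lt3 y x = true
        · rw [hx', if_pos h]; exact lt3_asymm h
        · rw [hx', if_neg h]; exact lt3_irrefl x
      have hyx' : lt3 y x' = false := by
        by_cases h : lt3 y x = true
        · rw [hx', if_pos h]; exact lt3_irrefl y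
        · rw [hx', if_neg h]; exact eq_false_of_ne_true h
      refine ⟨?_, notLt_trans hle hx'x, ?_⟩
      · rcases hmem with hm | hm
        · rw [hm, hx']
          by_cases h : lt3 y x = true
          · simp [h]
          · simp [eq_false_of_ne_true h]
        · exact Or.inr (List.mem_cons_of_mem y hm)
      · intro z hz
        rcases hz with _ | hz
        · exact notLt_trans hle hyx'
        · exact hall z (by assumption)

theorem min3?_spec {p : List (Int × Int × Int)} {m : Int × Int × Int}
    (h : min3? p = some m) : m ∈ p ∧ ∀ y ∈ p, lt3 y m = false := by
  cases p with
  | nil => cases h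
  | cons x t =>
      obtain ⟨hmem, hle, hall⟩ := fold_min_spec t x
      simp only [min3?, Option.some.injEq] at h
      subst h
      constructor
      · rcases hmem with hm | hm
        · rw [hm]; exact List.mem_cons_self
        · exact List.mem_cons_of_mem x hm
      · intro y hy
        rcases hy with _ | hy
        · exact hle
        · exact hall y (by assumption)

-- a sorted list's head is Python's min of any permutation of it
theorem min3?_of_perm_sorted {p : List (Int × Int × Int)} {v : Int × Int × Int}
    {t : List (Int × Int × Int)} (hp : p.Perm (v :: t)) (hs : (v :: t).Pairwise R3) :
    min3? p = some v := by
  cases hq : min3? p with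
  | none =>
      cases p with
      | nil => exact absurd hp.symm (by simp)
      | cons a b => simp [min3?] at hq
  | some m =>
      obtain ⟨hmem, hall⟩ := min3?_spec hq
      have hmvt : m ∈ v :: t := hp.mem_iff.mp hmem
      have hvm : lt3 v m = false := hall v (hp.mem_iff.mpr List.mem_cons_self)
      have hmv : lt3 m v = false := by
        rcases hmvt with _ | hm
        · exact lt3_irrefl v
        · exact (List.pairwise_cons.mp hs).1 m (by assumption)
      rw [lt3_antisymm hmv hvm]

theorem remove?_of_perm_sorted {p : List (Int × Int × Int)} {v : Int × Int × Int}
    {t : List (Int × Int × Int)} (hp : p.Perm (v :: t)) :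
    ∃ p', PySem.List.remove? p v = some p' ∧ p'.Perm t := by
  have hv : v ∈ p := hp.mem_iff.mpr List.mem_cons_self
  refine ⟨p.erase v, PySem.List.remove?_eq_some_erase p v hv, ?_⟩
  have := hp.erase v
  rwa [List.erase_cons_head] at this

-- the inner while of A on a SORTED pq1: the remaining pq1 is the filter of late jobs, and the
-- new pq2 is (up to permutation) pq2 plus the swapped early jobs, still sorted.
theorem moveA_spec (curr : Int) : ∀ (pq1 pq2 : List (Int × Int × Int)),
    pq1.Pairwise R3 → pq2.Pairwise R3 →
    (moveA pq1 pq2 curr).1 = pq1.filter (fun x => decide (curr < x.1)) ∧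
    (moveA pq1 pq2 curr).2.Pairwise R3 ∧
    (moveA pq1 pq2 curr).2.Perm
      (pq2 ++ (pq1.filter (fun x => decide (x.1 ≤ curr))).map (fun x => (x.2.1, x.1, x.2.2))) := by
  intro pq1
  induction pq1 with
  | nil => intro pq2 _ h2; exact ⟨rfl, h2, by simp [moveA]⟩
  | cons x t ih =>
      intro pq2 h1 h2
      rcases x with ⟨b, a, c⟩
      rcases List.pairwise_cons.mp h1 with ⟨hhd, ht⟩
      by_cases h : b ≤ curr
      · simp only [moveA, if_pos h]
        obtain ⟨e1, e2, e3⟩ := ih (pvIns (a, b, c) pq2) ht (ins_sorted h2)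
        refine ⟨?_, e2, ?_⟩
        · rw [e1, List.filter_cons_of_neg (by simp; omega)]
        · rw [List.filter_cons_of_pos (by simpa using h)]
          refine e3.trans ?_
          simp only [List.map_cons]
          exact ((ins_perm _ _).append_right _).trans List.perm_middle.symm
      · simp only [moveA, if_neg h]
        have hall : ∀ y ∈ t, curr < y.1 := fun y hy =>
          lt_of_lt_of_le (by omega) (lt3_false_fst_le (hhd y hy))
        refine ⟨?_, h2, ?_⟩
        · rw [List.filter_cons_of_pos (by simp; omega), List.filter_eq_self.mpr]
          intro y hy; simpa using hall y hy
        · have hf : ((b, a, c) :: t).filter (fun x => decide (x.1 ≤ curr)) = [] := by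
            rw [List.filter_eq_nil_iff]
            intro y hy
            rcases List.mem_cons.mp hy with rfl | hy
            · simpa using h
            · have := hall y hy; simp; omega
          rw [hf]; simp

-- the two main loops agree whenever A's heaps (as sorted lists) are permutations of B's lists
theorem loopAB : ∀ (fuel : Nat) (pq1 pq2 pending ready : List (Int × Int × Int)) (curr : Int) (ans : List Int),
    pq1.Pairwise R3 → pq2.Pairwise R3 → pq1.Perm pending → pq2.Perm ready →
    loopA fuel pq1 pq2 curr ans = loopB fuel pending ready curr ans := by
  intro fuel
  induction fuel with
  | zero => intro _ _ _ _ _ _ _ _ _ _; rfl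
  | succ fuel ih =>
      intro pq1 pq2 pending ready curr ans h1 h2 hp1 hp2
      by_cases hnil : pending = [] ∧ ready = []
      · have hA : pq1 = [] ∧ pq2 = [] := by
          rcases hnil with ⟨e1, e2⟩
          subst e1; subst e2
          exact ⟨hp1.eq_nil, hp2.eq_nil⟩
        rw [loopA, loopB, if_pos hA, if_pos hnil]
      · have hnilA : ¬ (pq1 = [] ∧ pq2 = []) := by
          rintro ⟨rfl, rfl⟩
          exact hnil ⟨hp1.symm.eq_nil, hp2.symm.eq_nil⟩
        rw [loopA, loopB, if_neg hnilA, if_neg hnil]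
        dsimp only
        set ready1 := ready ++ (pending.filter (fun j => decide (j.1 ≤ curr))).map (fun j => (j.2.1, j.1, j.2.2)) with hready1
        set pending1 := pending.filter (fun j => decide (curr < j.1)) with hpending1
        obtain ⟨e1, e2, e3⟩ := moveA_spec curr pq1 pq2 h1 h2
        rcases hM : moveA pq1 pq2 curr with ⟨P, Q⟩
        rw [hM] at e1 e2 e3
        dsimp only at e1 e2 e3
        dsimp only
        have hQperm : Q.Perm ready1 := by
          rw [hready1]
          exact e3.trans (List.Perm.append hp2 (List.Perm.map _ (hp1.filter _)))
        have hPperm : P.Perm pending1 := by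
          rw [e1, hpending1]; exact hp1.filter _
        have hPsorted : P.Pairwise R3 := by rw [e1]; exact h1.filter _
        cases Q with
        | nil =>
            have hr1 : ready1 = [] := hQperm.symm.eq_nil
            have hmr : min3? ready1 = none := by rw [hr1]; rfl
            rw [if_pos rfl]
            cases P with
            | nil =>
                have hp1' : pending1 = [] := hPperm.symm.eq_nil
                have hmp : min3? pending1 = none := by rw [hp1']; rfl
                simp [hmr, hmp]
            | cons x tP =>
                rcases x with ⟨b, a, c⟩
                have hmin : min3? pending1 = some (b, a, c) :=
                  min3?_of_perm_sorted hPperm.symm hPsorted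
                obtain ⟨p', hrem, hremp⟩ := remove?_of_perm_sorted (p := pending1)
                  (v := (b, a, c)) (t := tP) hPperm.symm
                simp only [hmr, hmin, hrem]
                have hsorted_tP : tP.Pairwise R3 := (List.pairwise_cons.mp hPsorted).2
                simp only [pvIns, PySem.List.insertBy]
                exact ih tP [] p' ready1 _ _ hsorted_tP (by simp) hremp.symm (by rw [hr1])
        | cons y tQ =>
            rcases y with ⟨a, b, c⟩
            have hmin : min3? ready1 = some (a, b, c) :=
              min3?_of_perm_sorted hQperm.symm e2
            obtain ⟨r', hrem, hremp⟩ := remove?_of_perm_sorted (p := ready1)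
              (v := (a, b, c)) (t := tQ) hQperm.symm
            rw [if_neg (List.cons_ne_nil _ _)]
            dsimp only
            simp only [hmin, hrem]
            have hsorted_tQ : tQ.Pairwise R3 := (List.pairwise_cons.mp e2).2
            exact ih P tQ pending1 r' _ _ hPsorted hsorted_tQ hPperm hremp.symm

-- building A's pq1 by repeated heap pushes yields a sorted permutation of B's mapped list
theorem build_perm (l : List (Int × Int × Int)) : ∀ acc : List (Int × Int × Int),
    acc.Pairwise R3 →
    (l.foldl (fun s x => pvIns (x.2.1, x.1, x.2.2) s) acc).Pairwise R3 ∧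
    (l.foldl (fun s x => pvIns (x.2.1, x.1, x.2.2) s) acc).Perm
      (acc ++ l.map (fun x => (x.2.1, x.1, x.2.2))) := by
  induction l with
  | nil => intro acc h; exact ⟨h, by simp⟩
  | cons x t ih =>
      intro acc h
      simp only [List.foldl_cons, List.map_cons]
      obtain ⟨s1, s2⟩ := ih (pvIns (x.2.1, x.1, x.2.2) acc) (ins_sorted h)
      exact ⟨s1, s2.trans (((ins_perm _ _).append_right _).trans List.perm_middle.symm)⟩

-- ===== VERDICT (by name: the statement is the Claim_ definition above) =====
theorem solution_spec : Claim_equal_solution := by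
  intro program _ _
  obtain ⟨hs, hp⟩ := build_perm program [] (by simp)
  have hperm : (program.foldl (fun s x => pvIns (x.2.1, x.1, x.2.2) s) []).Perm
      (program.map (fun x => (x.2.1, x.1, x.2.2))) := by simpa using hp
  have hlen := hperm.length_eq
  show solution program = solution_alt program
  simp only [solution, solution_alt]
  rw [← hlen, loopAB _ _ [] _ [] 0 (List.replicate 11 0) hs (by simp) hperm (List.Perm.refl [])]
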